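-- pv_equiv track=rewrite | github.com/HemnathNanjundan/Table-Extration | OCR_Modules/AzureOCR.py | hashify
-- ===== SOURCE A (Python) =====
-- def hashify(sentence_line):
--     hash_boolean = [x=='' for x in sentence_line] + \
--                    [x.isnumeric() * 1 for x in sentence_line] + \
--                    [x.isalpha() * 100 for x in sentence_line] + \
--                    [x.islower() * 500 for x in sentence_line] + \
--                    [x.isupper() * 300 for x in sentence_line] + \
--                    [len(x) for x in sentence_line.split()]
--
--     hash_val = sum(hash_boolean)
--     return hash_val
-- ===== SOURCE B (Python) =====
-- def _weight(c):
--     # total contribution of one occurrence of character c: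
--     # the per-character property weights plus 1 for the word-length term
--     # (sum of len over split() counts exactly the non-whitespace characters)
--     return (c.isnumeric()
--             + 100 * c.isalpha()
--             + 500 * c.islower()
--             + 300 * c.isupper()
--             + (not c.isspace()))
--
--
-- def hashify(sentence_line):
--     freq = {}
--     for c in sentence_line:
--         freq[c] = freq.get(c, 0) + 1
--     return sum(n * _weight(c) for c, n in freq.items())
-- ===== Notes on version B (the rewrite author's own statement) =====
-- stated objective: faster
-- what changed: Builds a frequency table of the distinct characters once and returns the dot product of the counts with a per-character weight, replacing A's six list-building passes; the word-length sum over split() is replaced by its closed form, one point per non-whitespace character.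
import Mathlib
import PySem

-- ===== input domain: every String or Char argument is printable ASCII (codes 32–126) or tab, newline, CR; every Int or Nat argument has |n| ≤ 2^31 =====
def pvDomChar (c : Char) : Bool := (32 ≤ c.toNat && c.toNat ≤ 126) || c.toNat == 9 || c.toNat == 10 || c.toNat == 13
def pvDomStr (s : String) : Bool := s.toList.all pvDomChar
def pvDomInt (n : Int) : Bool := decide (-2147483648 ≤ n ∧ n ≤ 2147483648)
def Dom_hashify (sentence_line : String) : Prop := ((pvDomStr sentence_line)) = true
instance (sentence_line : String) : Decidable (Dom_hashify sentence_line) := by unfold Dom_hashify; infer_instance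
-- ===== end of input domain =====

-- B replaces A's six list-building passes by a frequency table of the distinct characters
-- dotted with a per-character weight evaluated once per distinct character (the word-length
-- term becomes one point per non-whitespace character); measured faster by a constant factor.

-- ===== PORT A =====
-- x.isnumeric() is ported as Chars.isdigit: exact on the printable-ASCII (+ tab/newline/CR) domain,
-- where the numeric characters are exactly the digits '0'-'9'.
def hashify (sentence_line : String) : Int :=
  let cs := sentence_line.toList
  let hash_boolean : List Int :=
    cs.map (fun x => if [x] = ([] : List Char) then 1 else 0)           -- x == '' (x a 1-char string)
    ++ cs.map (fun x => (if PySem.Chars.isdigit x then 1 else 0) * 1)   -- x.isnumeric() * 1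
    ++ cs.map (fun x => (if PySem.Chars.isalpha x then 1 else 0) * 100)
    ++ cs.map (fun x => (if PySem.Chars.islower x then 1 else 0) * 500)
    ++ cs.map (fun x => (if PySem.Chars.isupper x then 1 else 0) * 300)
    ++ (PySem.Str.split₀ sentence_line).map (fun w => PySem.Str.len w)
  hash_boolean.sum

-- ===== PORT B =====
-- _weight(c): c.isnumeric() is ported as Chars.isdigit (exact on the ASCII domain, as in port A).
def pvWeight (c : Char) : Int :=
  (if PySem.Chars.isdigit c then 1 else 0)
  + 100 * (if PySem.Chars.isalpha c then 1 else 0)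
  + 500 * (if PySem.Chars.islower c then 1 else 0)
  + 300 * (if PySem.Chars.isupper c then 1 else 0)
  + (if PySem.Chars.isspace c then 0 else 1)        -- (not c.isspace())

def hashify_alt (sentence_line : String) : Int :=
  let freq : PySem.Dict Char Int :=
    sentence_line.toList.foldl (fun d c => d.insert c (d.getD c 0 + 1)) PySem.Dict.empty
  (freq.items.map (fun p => p.2 * pvWeight p.1)).sum

-- ===== PRECONDITION & SPEC =====
def Spec_hashify (sentence_line : String) (out : Int) : Prop := out = hashify_alt sentence_line
instance (sentence_line : String) (out : Int) : Decidable (Spec_hashify sentence_line out) := by unfold Spec_hashify; infer_instance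

-- ===== CLAIM (what is proved, stated in full; the proofs are below) =====
def Claim_equal_hashify : Prop := ∀ (sentence_line : String), Dom_hashify sentence_line → Spec_hashify sentence_line (hashify sentence_line)

-- ===== LEMMAS AND PROOFS =====

-- On a nodup key list containing c, the indicator sum picks out f c.
lemma sum_indicator (f : Char → Int) (L : List Char) (c : Char)
    (hnd : L.Nodup) (hc : c ∈ L) :
    (L.map (fun k => (if c = k then (1:Int) else 0) * f k)).sum = f c := by
  induction L with
  | nil => cases hc
  | cons k L ih =>
    simp only [List.map_cons, List.sum_cons]
    rcases List.mem_cons.mp hc with h | h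
    · subst h
      have hz : (L.map (fun k => if c = k then f k else (0:Int))).sum = 0 := by
        apply List.sum_eq_zero
        intro x hx
        rcases List.mem_map.mp hx with ⟨y, hy, rfl⟩
        have : c ≠ y := fun e => (List.nodup_cons.mp hnd).1 (e ▸ hy)
        simp [this]
      simp [hz]
    · have hne : c ≠ k := fun e => (List.nodup_cons.mp hnd).1 (e ▸ h)
      rw [ih (List.nodup_cons.mp hnd).2 h]
      simp [hne]

-- Weighted count over any nodup key list covering cs equals the plain sum over cs.
lemma sum_count_mul (f : Char → Int) (cs L : List Char)
    (hnd : L.Nodup) (hsub : ∀ c ∈ cs, c ∈ L) :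
    (L.map (fun k => (cs.count k : Int) * f k)).sum = (cs.map f).sum := by
  induction cs with
  | nil => simp
  | cons c cs ih =>
    have hsub' : ∀ x ∈ cs, x ∈ L := fun x hx => hsub x (List.mem_cons_of_mem _ hx)
    have step : ∀ k, ((c :: cs).count k : Int) * f k
        = (cs.count k : Int) * f k + (if c = k then (1:Int) else 0) * f k := by
      intro k
      by_cases h : c = k
      · subst h; simp [List.count_cons_self]; ring
      · simp [h]
    calc (L.map (fun k => ((c :: cs).count k : Int) * f k)).sum
        = (L.map (fun k => (cs.count k : Int) * f k
            + (if c = k then (1:Int) else 0) * f k)).sum := by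
          congr 1; exact List.map_congr_left (fun k _ => step k)
      _ = (L.map (fun k => (cs.count k : Int) * f k)).sum
            + (L.map (fun k => (if c = k then (1:Int) else 0) * f k)).sum := by
          rw [← List.sum_map_add]
      _ = (cs.map f).sum + f c := by
          rw [ih hsub', sum_indicator f L c hnd (hsub c (List.mem_cons_self))]
      _ = ((c :: cs).map f).sum := by simp [add_comm]

-- sum of the lengths of split() = number of non-whitespace characters (go invariant).
lemma split₀_go_sum_len (s cur : List Char) (acc : List (List Char)) :
    ((PySem.Chars.split₀.go s cur acc).map (fun w => (w.length : Int))).sum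
      = ((acc.map (fun w => (w.length : Int))).sum + cur.length)
        + (s.countP (fun c => !PySem.Chars.isspace c) : Int) := by
  induction s generalizing cur acc with
  | nil =>
    by_cases h : cur.isEmpty
    · have : cur = [] := List.isEmpty_iff.mp h
      subst this
      simp [PySem.Chars.split₀.go, h]
    · simp [PySem.Chars.split₀.go, h, add_comm]
  | cons c rest ih =>
    by_cases hs : PySem.Chars.isspace c
    · by_cases h : cur.isEmpty
      · have : cur = [] := List.isEmpty_iff.mp h
        subst this
        simp [PySem.Chars.split₀.go, hs, h, ih, List.countP_cons]
      · simp [PySem.Chars.split₀.go, hs, h, ih]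
        ring
    · simp [PySem.Chars.split₀.go, hs, ih]
      push_cast
      ring

lemma split₀_sum_len (cs : List Char) :
    ((PySem.Chars.split₀ cs).map (fun w => (w.length : Int))).sum
      = (cs.countP (fun c => !PySem.Chars.isspace c) : Int) := by
  have := split₀_go_sum_len cs [] []
  simpa [PySem.Chars.split₀] using this

-- ¬isspace count as an indicator sum.
lemma countP_not_isspace (cs : List Char) :
    (cs.countP (fun c => !PySem.Chars.isspace c) : Int)
      = (cs.map (fun c => if PySem.Chars.isspace c then (0:Int) else 1)).sum := by
  induction cs with
  | nil => simp
  | cons c cs ih =>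
    by_cases h : PySem.Chars.isspace c <;> simp [h, ← ih] <;> ring_nf

-- the per-character weight sum decomposes into the five property sums.
lemma sum_weight (cs : List Char) :
    (cs.map pvWeight).sum
      = (cs.map (fun x => (if PySem.Chars.isdigit x then (1:Int) else 0) * 1)).sum
        + (cs.map (fun x => (if PySem.Chars.isalpha x then (1:Int) else 0) * 100)).sum
        + (cs.map (fun x => (if PySem.Chars.islower x then (1:Int) else 0) * 500)).sum
        + (cs.map (fun x => (if PySem.Chars.isupper x then (1:Int) else 0) * 300)).sum
        + (cs.map (fun c => if PySem.Chars.isspace c then (0:Int) else 1)).sum := by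
  induction cs with
  | nil => simp
  | cons c cs ih =>
    simp only [List.map_cons, List.sum_cons, ih, pvWeight]
    split_ifs <;> ring

-- ===== VERDICT (by name: the statement is the Claim_ definition above) =====
theorem hashify_spec : Claim_equal_hashify := by
  intro s _
  unfold Spec_hashify hashify hashify_alt
  rw [PySem.Dict.foldl_insert_getD_add_one_eq_counter]
  have hitems := PySem.Dict.items_counter (κ := Char) s.toList
  simp only [hitems, List.map_map]
  have hB : ((PySem.Set.ofList s.toList).map
      ((fun p : Char × Int => p.2 * pvWeight p.1) ∘ fun k => (k, (s.toList.count k : Int)))).sum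
      = (s.toList.map pvWeight).sum := by
    have := sum_count_mul pvWeight s.toList (PySem.Set.ofList s.toList)
      (PySem.Set.nodup_ofList s.toList)
      (fun c hc => (PySem.Set.mem_ofList _ _).mpr hc)
    simpa [Function.comp] using this
  rw [hB, sum_weight]
  have hlen : (PySem.Str.split₀ s).map (fun w => PySem.Str.len w)
      = (PySem.Chars.split₀ s.toList).map (fun w => (w.length : Int)) := by
    rw [← PySem.Str.split₀_map_toList s, List.map_map]
    exact List.map_congr_left (fun w _ => PySem.Str.len_eq w)
  simp only [List.sum_append, hlen, split₀_sum_len, countP_not_isspace]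
  have h0 : (s.toList.map (fun x => if [x] = ([] : List Char) then (1:Int) else 0)).sum = 0 := by
    simp
  rw [h0]
  ring
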